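-- pv_equiv track=rewrite | github.com/thinkSharp/Interviews | Abbreviation.py | abbreviation1
-- ===== SOURCE A (Python) =====
-- def abbreviation1(a, b):
--     lower_a = a.lower()
--     lower_b = b.lower()
--     i = 0
--     j = 0
--     while True:
--         if j == len(lower_b):
--             return "YES"
--         if i == len(lower_a):
--             return "NO"
--         if lower_a[i] == lower_b[j]:
--             i += 1
--             j += 1
--         else:
--             i += 1
--     return "NO"
-- ===== SOURCE B (Python) =====
-- def abbreviation1(a, b):
--     la = a.lower()
--     lb = b.lower()
--     pos = {}
--     for i, c in enumerate(la):
--         pos.setdefault(c, []).append(i)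
--     cur = {}
--     prev = -1
--     for c in lb:
--         ps = pos.get(c)
--         if ps is None:
--             return "NO"
--         k = cur.get(c, 0)
--         while k < len(ps) and ps[k] <= prev:
--             k += 1
--         if k == len(ps):
--             return "NO"
--         prev = ps[k]
--         cur[c] = k + 1
--     return "YES"
-- ===== Notes on version B (the rewrite author's own statement) =====
-- stated objective: alternative
-- what changed: Replaces the two-pointer greedy scan over a with a per-character index table built in one pass over a, then consumed as monotone per-character position queues while iterating over b.
import Mathlib
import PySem

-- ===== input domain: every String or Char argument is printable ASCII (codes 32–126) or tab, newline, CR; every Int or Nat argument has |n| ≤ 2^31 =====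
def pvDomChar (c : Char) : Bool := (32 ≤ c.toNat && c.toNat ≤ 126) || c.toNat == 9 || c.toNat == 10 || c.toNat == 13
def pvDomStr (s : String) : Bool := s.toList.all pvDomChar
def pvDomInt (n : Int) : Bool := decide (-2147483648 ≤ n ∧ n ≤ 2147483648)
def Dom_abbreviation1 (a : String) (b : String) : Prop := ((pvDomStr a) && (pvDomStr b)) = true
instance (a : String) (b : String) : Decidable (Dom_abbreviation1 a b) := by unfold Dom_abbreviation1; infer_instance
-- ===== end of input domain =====

-- B replaces A's two-pointer greedy scan by a per-character index table consumed as
-- monotone position queues (alternative decomposition, same asymptotic cost).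

-- ===== PORT A =====
-- the while loop over (i, j): structural recursion over the suffixes lower_a[i:], lower_b[j:]
def abbrGo : List Char → List Char → String
  | _, [] => "YES"
  | [], _ :: _ => "NO"
  | x :: xs, y :: ys => if x = y then abbrGo xs ys else abbrGo xs (y :: ys)

def abbreviation1 (a : String) (b : String) : String :=
  abbrGo (PySem.Str.lower a).toList (PySem.Str.lower b).toList

-- ===== PORT B =====
-- the inner while loop: advance k while k < len(ps) and ps[k] <= prev
def skipLe (ps : List Int) (prev : Int) (k : Int) : Int :=
  if h : k < (ps.length : Int) ∧ PySem.List.pyGetD ps k 0 ≤ prev then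
    skipLe ps prev (k + 1)
  else k
termination_by ((ps.length : Int) - k).toNat
decreasing_by omega

-- the for-loop over lb with state (pos, cur, prev); pyGetD ps k 0 ports ps[k] (k is in range at both uses)
def abbrMatch : List Char → PySem.Dict Char (List Int) → PySem.Dict Char Int → Int → String
  | [], _, _, _ => "YES"
  | c :: cs, pos, cur, prev =>
    match pos.get? c with
    | none => "NO"
    | some ps =>
      let k := skipLe ps prev (cur.getD c 0)
      if k = (ps.length : Int) then "NO"
      else abbrMatch cs pos (cur.insert c (k + 1)) (PySem.List.pyGetD ps k 0)

-- pos.setdefault(c, []).append(i) leaves pos[c] = pos.get(c, []) + [i] with the key at its first-occurrence position, i.e. Dict.modify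
def abbreviation1_alt (a : String) (b : String) : String :=
  abbrMatch (PySem.Str.lower b).toList
    ((PySem.List.enumerate (PySem.Str.lower a).toList).foldl
      (fun d p => d.modify p.2 [] (fun ps => ps ++ [p.1])) PySem.Dict.empty)
    PySem.Dict.empty
    (-1)

-- ===== PRECONDITION & SPEC =====
def Spec_abbreviation1 (a : String) (b : String) (out : String) : Prop := out = abbreviation1_alt a b
instance (a : String) (b : String) (out : String) : Decidable (Spec_abbreviation1 a b out) := by unfold Spec_abbreviation1; infer_instance

-- ===== CLAIM (what is proved, stated in full; the proofs are below) =====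
def Claim_equal_abbreviation1 : Prop := ∀ (a : String) (b : String), Dom_abbreviation1 a b → Spec_abbreviation1 a b (abbreviation1 a b)

-- ===== LEMMAS AND PROOFS =====

-- occFrom c L n = ascending list of positions (offset by n) at which c occurs in L
def occFrom (c : Char) : List Char → Int → List Int
  | [], _ => []
  | x :: xs, n => if x = c then n :: occFrom c xs (n + 1) else occFrom c xs (n + 1)

theorem occFrom_mem_le (c : Char) : ∀ (L : List Char) (n i : Int), i ∈ occFrom c L n → n ≤ i := by
  intro L
  induction L with
  | nil => intro n i h; simp [occFrom] at h
  | cons x xs ih =>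
    intro n i h
    simp only [occFrom] at h
    split at h
    · rcases List.mem_cons.mp h with h | h
      · omega
      · have := ih (n + 1) i h; omega
    · have := ih (n + 1) i h; omega

theorem occFrom_pairwise (c : Char) : ∀ (L : List Char) (n : Int), (occFrom c L n).Pairwise (· < ·) := by
  intro L
  induction L with
  | nil => intro n; simp [occFrom]
  | cons x xs ih =>
    intro n
    simp only [occFrom]
    split
    · exact List.pairwise_cons.mpr ⟨fun i hi => by have := occFrom_mem_le c xs (n + 1) i hi; omega, ih (n + 1)⟩
    · exact ih (n + 1)

theorem occFrom_drop (c : Char) : ∀ (m : Nat) (L : List Char) (n : Int),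
    (occFrom c L n).filter (fun i => decide (n + (m : Int) ≤ i)) = occFrom c (L.drop m) (n + (m : Int)) := by
  intro m
  induction m with
  | zero =>
    intro L n
    simp only [Nat.cast_zero, add_zero, List.drop_zero]
    apply List.filter_eq_self.mpr
    intro i hi
    simpa using occFrom_mem_le c L n i hi
  | succ m ih =>
    intro L n
    cases L with
    | nil => simp [occFrom]
    | cons x xs =>
      have key : (occFrom c xs (n + 1)).filter (fun i => decide (n + ((m : Int) + 1) ≤ i)) =
          occFrom c (xs.drop m) (n + ((m : Int) + 1)) := by
        have := ih xs (n + 1)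
        have harg : n + ((m : Int) + 1) = n + 1 + (m : Int) := by ring
        rw [harg]
        exact this
      simp only [occFrom, List.drop_succ_cons]
      split
      · rw [List.filter_cons]
        simp only [Nat.cast_succ]
        rw [if_neg (by simp only [decide_eq_true_eq]; omega)]
        exact key
      · simp only [Nat.cast_succ]
        exact key

-- A's loop consuming (c :: cs): skip along w to the first occurrence of c
theorem abbrGo_nil_snd (w : List Char) : abbrGo w [] = "YES" := by
  cases w <;> rfl

theorem abbrGo_step (c : Char) (cs : List Char) : ∀ (w : List Char) (n : Int),
    abbrGo w (c :: cs) =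
      (match occFrom c w n with
       | [] => "NO"
       | p :: _ => abbrGo (w.drop ((p - n).toNat + 1)) cs) := by
  intro w
  induction w with
  | nil => intro n; simp [abbrGo, occFrom]
  | cons x xs ih =>
    intro n
    simp only [abbrGo, occFrom]
    by_cases hx : x = c
    · simp only [if_pos hx]
      simp
    · simp only [if_neg hx]
      rw [ih (n + 1)]
      cases hocc : occFrom c xs (n + 1) with
      | nil => simp
      | cons p rest =>
        have hp : n + 1 ≤ p := occFrom_mem_le c xs (n + 1) p (by rw [hocc]; exact List.mem_cons_self)
        have : (p - n).toNat + 1 = ((p - (n + 1)).toNat + 1) + 1 := by omega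
        simp only [this, List.drop_succ_cons]

-- tail of the occurrence list = occurrences in the suffix after the matched position
theorem occFrom_tail (c : Char) : ∀ (w : List Char) (n p : Int) (rest : List Int),
    occFrom c w n = p :: rest → rest = occFrom c (w.drop ((p - n).toNat + 1)) (p + 1) := by
  intro w
  induction w with
  | nil => intro n p rest h; simp [occFrom] at h
  | cons x xs ih =>
    intro n p rest h
    simp only [occFrom] at h
    split at h
    · injection h with h1 h2
      subst h1; subst h2
      simp
    · have hp : n + 1 ≤ p := occFrom_mem_le c xs (n + 1) p (by rw [h]; exact List.mem_cons_self)
      have := ih (n + 1) p rest h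
      have harg : (p - n).toNat + 1 = ((p - (n + 1)).toNat + 1) + 1 := by omega
      rw [harg, List.drop_succ_cons]
      exact this

-- on a strictly ascending list, the k-scan (dropWhile ≤ t-1) is the filter (t ≤ ·)
theorem dropWhile_eq_filter_sorted (t : Int) : ∀ (l : List Int), l.Pairwise (· < ·) →
    l.dropWhile (fun x => decide (x ≤ t - 1)) = l.filter (fun i => decide (t ≤ i)) := by
  intro l
  induction l with
  | nil => intro _; rfl
  | cons x xs ih =>
    intro hp
    obtain ⟨hall, hxs⟩ := List.pairwise_cons.mp hp
    by_cases hx : x ≤ t - 1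
    · rw [List.dropWhile_cons_of_pos (by simpa using hx), List.filter_cons,
        if_neg (by simp; omega)]
      exact ih hxs
    · rw [List.dropWhile_cons_of_neg (by simpa using hx), List.filter_cons,
        if_pos (by simp; omega)]
      congr 1
      symm
      apply List.filter_eq_self.mpr
      intro i hi
      have := hall i hi
      simp; omega

-- the while loop lands on a Nat index j with drop j = dropWhile (≤ prev) of drop k
theorem skipLe_spec (ps : List Int) (prev : Int) : ∀ (fuel : Nat) (k : Nat), k ≤ ps.length →
    ps.length - k ≤ fuel →
    ∃ j : Nat, skipLe ps prev (k : Int) = (j : Int) ∧ k ≤ j ∧ j ≤ ps.length ∧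
      ps.drop j = (ps.drop k).dropWhile (fun x => decide (x ≤ prev)) := by
  intro fuel
  induction fuel with
  | zero =>
    intro k hk hf
    have hkl : k = ps.length := by omega
    refine ⟨k, ?_, le_refl _, hk, ?_⟩
    · rw [skipLe, dif_neg (by rintro ⟨h1, -⟩; omega)]
    · rw [hkl, List.drop_length]; rfl
  | succ fuel ih =>
    intro k hk _
    by_cases hlt : k < ps.length
    case neg =>
      have hkl : k = ps.length := by omega
      refine ⟨k, ?_, le_refl _, hk, ?_⟩
      · rw [skipLe, dif_neg (by rintro ⟨h1, -⟩; omega)]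
      · rw [hkl, List.drop_length]; rfl
    case pos =>
      have hdk : ps.drop k = ps[k] :: ps.drop (k + 1) := List.drop_eq_getElem_cons hlt
      have hpg : PySem.List.pyGetD ps (k : Int) 0 = ps[k]'hlt := PySem.List.pyGetD_ofNat ps k 0 hlt
      by_cases hle : ps[k]'hlt ≤ prev
      · obtain ⟨j, h1, h2, h3, h4⟩ := ih (k + 1) (by omega) (by omega)
        refine ⟨j, ?_, by omega, h3, ?_⟩
        · rw [skipLe, dif_pos ⟨by exact_mod_cast hlt, by rw [hpg]; exact hle⟩]
          rw [show ((k : Int) + 1) = ((k + 1 : Nat) : Int) by push_cast; ring]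
          exact h1
        · rw [hdk, List.dropWhile_cons_of_pos (by simpa using hle)]
          exact h4
      · refine ⟨k, ?_, le_refl _, hk, ?_⟩
        · rw [skipLe, dif_neg (by rintro ⟨-, hc⟩; rw [hpg] at hc; exact hle hc)]
        · rw [hdk, List.dropWhile_cons_of_neg (by simpa using hle)]

-- the loop invariant: the unconsumed part of each stored list is ascending and, above m,
-- is exactly the occurrence list of the suffix L.drop m
def AbbrInv (L : List Char) (pos : PySem.Dict Char (List Int)) (cur : PySem.Dict Char Int) (m : Nat) : Prop :=
  ∀ c, 0 ≤ cur.getD c 0 ∧ (cur.getD c 0).toNat ≤ (pos.getD c []).length ∧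
    ((pos.getD c []).drop (cur.getD c 0).toNat).Pairwise (· < ·) ∧
    ((pos.getD c []).drop (cur.getD c 0).toNat).filter (fun i => decide ((m : Int) ≤ i)) =
      occFrom c (L.drop m) (m : Int)

theorem abbrMatch_none (c : Char) (cs : List Char) (pos : PySem.Dict Char (List Int))
    (cur : PySem.Dict Char Int) (prev : Int)
    (h : pos.get? c = none) : abbrMatch (c :: cs) pos cur prev = "NO" := by
  simp [abbrMatch, h]

theorem abbrMatch_some (c : Char) (cs : List Char) (pos : PySem.Dict Char (List Int))
    (cur : PySem.Dict Char Int) (prev : Int) (ps : List Int) (h : pos.get? c = some ps) :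
    abbrMatch (c :: cs) pos cur prev =
      (if skipLe ps prev (cur.getD c 0) = (ps.length : Int) then "NO"
       else abbrMatch cs pos (cur.insert c (skipLe ps prev (cur.getD c 0) + 1))
              (PySem.List.pyGetD ps (skipLe ps prev (cur.getD c 0)) 0)) := by
  simp [abbrMatch, h]

theorem abbrMatch_eq_abbrGo (L : List Char) : ∀ (cs : List Char) (pos : PySem.Dict Char (List Int))
    (cur : PySem.Dict Char Int) (m : Nat),
    AbbrInv L pos cur m → abbrMatch cs pos cur ((m : Int) - 1) = abbrGo (L.drop m) cs := by
  intro cs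
  induction cs with
  | nil => intro pos cur m _; rw [abbrGo_nil_snd]; rfl
  | cons c cs ih =>
    intro pos cur m hinv
    obtain ⟨hnn, hlen, hpw, hfil⟩ := hinv c
    rw [abbrGo_step c cs (L.drop m) (m : Int)]
    cases hget : pos.get? c with
    | none =>
      have h0 : pos.getD c [] = [] := PySem.Dict.getD_of_get?_eq_none pos [] hget
      rw [h0, List.drop_nil] at hfil
      have hocc : occFrom c (L.drop m) (m : Int) = [] := by simpa using hfil.symm
      rw [abbrMatch_none c cs pos cur _ hget, hocc]
    | some ps =>
      have hps : pos.getD c [] = ps := PySem.Dict.getD_of_get?_eq_some pos [] hget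
      rw [hps] at hlen hpw hfil
      set k0 : Nat := (cur.getD c 0).toNat with hk0
      have hcur : cur.getD c 0 = (k0 : Int) := by omega
      obtain ⟨j, hj, hkj, hjl, hdropj⟩ :=
        skipLe_spec ps ((m : Int) - 1) ps.length k0 hlen (by omega)
      have hdw : ps.drop j = occFrom c (L.drop m) (m : Int) := by
        rw [hdropj, dropWhile_eq_filter_sorted (m : Int) _ hpw]
        exact hfil
      rw [abbrMatch_some c cs pos cur _ ps hget, hcur, hj]
      cases hocc : occFrom c (L.drop m) (m : Int) with
      | nil =>
        rw [hocc] at hdw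
        have : j = ps.length := by
          have := List.drop_eq_nil_iff.mp hdw
          omega
        rw [if_pos (by exact_mod_cast this)]
      | cons p rest =>
        rw [hocc] at hdw
        have hjlt : j < ps.length := by
          by_contra h
          rw [List.drop_eq_nil_of_le (by omega)] at hdw
          exact absurd hdw.symm (List.cons_ne_nil p rest)
        have hif : ((j : Int) ≠ (ps.length : Int)) := by
          intro h; omega
        rw [if_neg hif]
        have hpj : ps[j]'hjlt = p := by
          have h1 : (ps.drop j)[0]? = some p := by rw [hdw]; rfl
          rw [List.getElem?_drop, Nat.add_zero, List.getElem?_eq_getElem hjlt] at h1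
          exact Option.some.inj h1
        have hpg : PySem.List.pyGetD ps (j : Int) 0 = p := by
          rw [PySem.List.pyGetD_ofNat ps j 0 hjlt, hpj]
        rw [hpg]
        show abbrMatch cs pos (cur.insert c ((j : Int) + 1)) p = abbrGo ((L.drop m).drop ((p - (m : Int)).toNat + 1)) cs
        have hrest_drop : ps.drop (j + 1) = rest := by
          have : ps.drop (j + 1) = (ps.drop j).drop 1 := by
            rw [List.drop_drop]
          rw [this, hdw]; rfl
        have hpm : (m : Int) ≤ p :=
          occFrom_mem_le c (L.drop m) (m : Int) p (by rw [hocc]; exact List.mem_cons_self)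
        have hrest_gt : ∀ i ∈ rest, p < i := by
          have := occFrom_pairwise c (L.drop m) (m : Int)
          rw [hocc] at this
          exact (List.pairwise_cons.mp this).1
        have hrest : rest = occFrom c (L.drop ((p + 1).toNat)) ((p + 1 : Int)) := by
          have h1 := occFrom_tail c (L.drop m) (m : Int) p rest hocc
          rw [List.drop_drop] at h1
          have harg : m + ((p - (m : Int)).toNat + 1) = (p + 1).toNat := by omega
          rw [harg] at h1
          exact h1
        set m' : Nat := (p + 1).toNat with hm'
        have hm'cast : (m' : Int) = p + 1 := by omega
        have hnewinv : AbbrInv L pos (cur.insert c ((j : Int) + 1)) m' := by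
          intro c'
          by_cases hc : c' = c
          · subst hc
            rw [PySem.Dict.getD_insert_self, hps]
            have htn : ((j : Int) + 1).toNat = j + 1 := by omega
            rw [htn, hrest_drop]
            refine ⟨by omega, by omega, ?_, ?_⟩
            · have := occFrom_pairwise c' (L.drop m) (m : Int)
              rw [hocc] at this
              exact (List.pairwise_cons.mp this).2
            · rw [List.filter_eq_self.mpr (by intro i hi; have := hrest_gt i hi; simp only [decide_eq_true_eq]; omega)]
              rw [hrest, hm'cast]
          · rw [PySem.Dict.getD_insert_of_ne _ _ _ (hne := hc)]
            obtain ⟨hnn', hlen', hpw', hfil'⟩ := hinv c'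
            refine ⟨hnn', hlen', hpw', ?_⟩
            have hmm' : m ≤ m' := by omega
            set st := (pos.getD c' []).drop (cur.getD c' 0).toNat
            have hstep : st.filter (fun i => decide ((m' : Int) ≤ i)) =
                (st.filter (fun i => decide ((m : Int) ≤ i))).filter
                  (fun i => decide ((m' : Int) ≤ i)) := by
              rw [List.filter_filter]
              apply List.filter_congr
              intro i _
              by_cases h : (m' : Int) ≤ i
              · simp [h, show (m : Int) ≤ i by omega]
              · simp [h]
            rw [hstep, hfil']
            have hod := occFrom_drop c' (m' - m) (L.drop m) (m : Int)
            rw [List.drop_drop] at hod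
            have harg1 : m + (m' - m) = m' := by omega
            have harg2 : (m : Int) + ((m' - m : Nat) : Int) = (m' : Int) := by
              push_cast [Nat.cast_sub hmm']; ring
            rw [harg1, harg2] at hod
            exact hod
        have hfin := ih pos (cur.insert c ((j : Int) + 1)) m' hnewinv
        have harg : m + ((p - (m : Int)).toNat + 1) = m' := by omega
        rw [List.drop_drop, harg]
        rw [show p = (m' : Int) - 1 by omega]
        exact hfin

theorem build_getD (c : Char) : ∀ (l : List (Int × Char)) (d : PySem.Dict Char (List Int)),
    (l.foldl (fun d p => d.modify p.2 [] (fun ps => ps ++ [p.1])) d).getD c [] =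
      d.getD c [] ++ (l.filter (fun p => p.2 == c)).map (·.1) := by
  intro l
  induction l with
  | nil => intro d; simp
  | cons p l ih =>
    intro d
    simp only [List.foldl_cons, List.filter_cons]
    rw [ih]
    by_cases hc : p.2 = c
    · rw [PySem.Dict.getD_modify]
      simp [hc]
    · rw [PySem.Dict.getD_modify]
      simp [hc, Ne.symm hc, beq_iff_eq]

theorem enumerate_filter_occ (c : Char) : ∀ (L : List Char) (s : Int),
    ((PySem.List.enumerate L s).filter (fun p => p.2 == c)).map (·.1) = occFrom c L s := by
  intro L
  induction L with
  | nil => intro s; simp [PySem.List.enumerate_nil, occFrom]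
  | cons x xs ih =>
    intro s
    rw [PySem.List.enumerate_cons, List.filter_cons]
    simp only [occFrom]
    by_cases hx : x = c
    · rw [if_pos (by simp [hx]), if_pos hx, List.map_cons, ih]
    · rw [if_neg (by simp [hx]), if_neg hx, ih]

-- ===== VERDICT (by name: the statement is the Claim_ definition above) =====
theorem abbreviation1_spec : Claim_equal_abbreviation1 := by
  intro a b _
  unfold Spec_abbreviation1 abbreviation1 abbreviation1_alt
  set La := (PySem.Str.lower a).toList with hLa
  set Lb := (PySem.Str.lower b).toList with hLb
  have hinv : AbbrInv La ((PySem.List.enumerate La).foldl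
      (fun d p => d.modify p.2 [] (fun ps => ps ++ [p.1])) PySem.Dict.empty) PySem.Dict.empty 0 := by
    intro c
    have h := build_getD c (PySem.List.enumerate La) PySem.Dict.empty
    rw [PySem.Dict.getD_empty, enumerate_filter_occ c La 0, List.nil_append] at h
    rw [h, PySem.Dict.getD_empty]
    refine ⟨le_refl _, by simp, ?_, ?_⟩
    · simpa using occFrom_pairwise c La 0
    · simp only [Int.toNat_zero, List.drop_zero, List.drop_zero]
      apply List.filter_eq_self.mpr
      intro i hi
      simpa using occFrom_mem_le c La 0 i hi
  have hmain := abbrMatch_eq_abbrGo La Lb _ PySem.Dict.empty 0 hinv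
  simp only [Nat.cast_zero, List.drop_zero] at hmain
  rw [show ((0:Int) - 1) = (-1 : Int) by norm_num] at hmain
  exact hmain.symm
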